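-- pv_equiv track=rewrite | github.com/bethneyQQ/SWE4CC | swebench/inference/patch_validator.py | analyze_patch_complexity
-- ===== SOURCE A (Python) =====
-- from typing import Dict, Tuple, Optional
--
-- def analyze_patch_complexity(patch_content: str) -> Dict[str, int]:
--     """
--     Analyze patch complexity metrics.
--
--     Returns:
--         Dict with: files_changed, hunks, lines_added, lines_removed, context_lines
--     """
--     stats = {
--         'files_changed': 0,
--         'hunks': 0,
--         'lines_added': 0,
--         'lines_removed': 0,
--         'context_lines': 0
--     }
--
--     if not patch_content:
--         return stats
--
--     lines = patch_content.split('\n')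
--
--     for line in lines:
--         if line.startswith('+++'):
--             stats['files_changed'] += 1
--         elif line.startswith('@@'):
--             stats['hunks'] += 1
--         elif line.startswith('+') and not line.startswith('+++'):
--             stats['lines_added'] += 1
--         elif line.startswith('-') and not line.startswith('---'):
--             stats['lines_removed'] += 1
--         elif line.startswith(' '):
--             stats['context_lines'] += 1
--
--     return stats
-- ===== SOURCE B (Python) =====
-- def analyze_patch_complexity(patch_content: str):
--     """Same stats via five independent whole-list scans instead of one elif classification loop."""
--     if not patch_content:
--         return {
--             'files_changed': 0,
--             'hunks': 0,
--             'lines_added': 0,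
--             'lines_removed': 0,
--             'context_lines': 0
--         }
--     lines = patch_content.split('\n')
--     return {
--         'files_changed': sum(1 for line in lines if line.startswith('+++')),
--         'hunks': sum(1 for line in lines if line.startswith('@@')),
--         'lines_added': sum(1 for line in lines if line.startswith('+') and not line.startswith('+++')),
--         'lines_removed': sum(1 for line in lines if line.startswith('-') and not line.startswith('---')),
--         'context_lines': sum(1 for line in lines if line.startswith(' ')),
--     }
-- ===== Notes on version B (the rewrite author's own statement) =====
-- stated objective: idiomatic
-- what changed: Replaced the single stateful elif-classification loop over a mutable stats dict with a dict literal of five independent sum(...) scans, one predicate per statistic.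
import Mathlib
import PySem

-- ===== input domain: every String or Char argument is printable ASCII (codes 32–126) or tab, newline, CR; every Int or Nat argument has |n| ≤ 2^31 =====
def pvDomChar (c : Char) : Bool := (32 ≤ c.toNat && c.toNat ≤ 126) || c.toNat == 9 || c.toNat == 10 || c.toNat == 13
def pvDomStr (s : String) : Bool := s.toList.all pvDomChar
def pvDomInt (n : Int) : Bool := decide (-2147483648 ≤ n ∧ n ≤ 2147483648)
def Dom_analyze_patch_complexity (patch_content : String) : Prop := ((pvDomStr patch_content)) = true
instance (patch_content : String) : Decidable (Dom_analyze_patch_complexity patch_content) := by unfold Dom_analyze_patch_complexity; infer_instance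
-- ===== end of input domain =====

-- B builds the stats dict as five independent predicate counts instead of A's single stateful elif-classification loop (idiomatic decomposition; same cost).

-- ===== PORT A =====
def analyze_patch_complexity (patch_content : String) : List (String × Int) :=
  let stats : PySem.Dict String Int :=
    PySem.Dict.mk [("files_changed", 0), ("hunks", 0), ("lines_added", 0),
                   ("lines_removed", 0), ("context_lines", 0)]
  if patch_content == "" then stats.items
  else
    let lines := (PySem.Str.split? patch_content "\n").getD []   -- sep "\n" ≠ "", so split? is always `some`
    (lines.foldl (fun d line =>
      if PySem.Str.startswith line "+++" then d.modify "files_changed" 0 (· + 1)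
      else if PySem.Str.startswith line "@@" then d.modify "hunks" 0 (· + 1)
      else if PySem.Str.startswith line "+" && !(PySem.Str.startswith line "+++") then d.modify "lines_added" 0 (· + 1)
      else if PySem.Str.startswith line "-" && !(PySem.Str.startswith line "---") then d.modify "lines_removed" 0 (· + 1)
      else if PySem.Str.startswith line " " then d.modify "context_lines" 0 (· + 1)
      else d) stats).items

-- ===== PORT B =====
def analyze_patch_complexity_alt (patch_content : String) : List (String × Int) :=
  if patch_content == "" then
    [("files_changed", 0), ("hunks", 0), ("lines_added", 0), ("lines_removed", 0), ("context_lines", 0)]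
  else
    let lines := (PySem.Str.split? patch_content "\n").getD []
    [("files_changed", (lines.countP (fun l => PySem.Str.startswith l "+++") : Int)),
     ("hunks", (lines.countP (fun l => PySem.Str.startswith l "@@") : Int)),
     ("lines_added", (lines.countP (fun l => PySem.Str.startswith l "+" && !(PySem.Str.startswith l "+++")) : Int)),
     ("lines_removed", (lines.countP (fun l => PySem.Str.startswith l "-" && !(PySem.Str.startswith l "---")) : Int)),
     ("context_lines", (lines.countP (fun l => PySem.Str.startswith l " ") : Int))]

-- ===== PRECONDITION & SPEC =====
def Spec_analyze_patch_complexity (patch_content : String) (out : List (String × Int)) : Prop := out = analyze_patch_complexity_alt patch_content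
instance (patch_content : String) (out : List (String × Int)) : Decidable (Spec_analyze_patch_complexity patch_content out) := by unfold Spec_analyze_patch_complexity; infer_instance

-- ===== CLAIM (what is proved, stated in full; the proofs are below) =====
def Claim_equal_analyze_patch_complexity : Prop := ∀ (patch_content : String), Dom_analyze_patch_complexity patch_content → Spec_analyze_patch_complexity patch_content (analyze_patch_complexity patch_content)

-- ===== LEMMAS AND PROOFS =====

-- startswith on a nonempty pattern forces the first character
theorem pv_sw_cons {t p : List Char} {c d : Char} (hne : d ≠ c) :
    PySem.Chars.startswith (c :: t) (d :: p) = false := by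
  rw [Bool.eq_false_iff]
  intro h
  rw [PySem.Chars.startswith_iff] at h
  obtain ⟨u, hu⟩ := h
  simp only [List.cons_append, List.cons.injEq] at hu
  exact hne hu.1

theorem pv_sw_nil {p : List Char} {c : Char} :
    PySem.Chars.startswith ([] : List Char) (c :: p) = false := by
  rw [Bool.eq_false_iff]
  intro h
  rw [PySem.Chars.startswith_iff] at h
  obtain ⟨u, hu⟩ := h
  simp at hu

theorem pv_sw_single {t : List Char} {c : Char} :
    PySem.Chars.startswith (c :: t) [c] = true := by
  rw [PySem.Chars.startswith_iff]
  exact ⟨t, rfl⟩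

-- Loop invariant for A's fold: folding the classification step over l adds each predicate's count to its slot.
theorem pv_foldl_stats (l : List String) (a b c d e : Int) :
    (l.foldl (fun d line =>
      if PySem.Str.startswith line "+++" then d.modify "files_changed" 0 (· + 1)
      else if PySem.Str.startswith line "@@" then d.modify "hunks" 0 (· + 1)
      else if PySem.Str.startswith line "+" && !(PySem.Str.startswith line "+++") then d.modify "lines_added" 0 (· + 1)
      else if PySem.Str.startswith line "-" && !(PySem.Str.startswith line "---") then d.modify "lines_removed" 0 (· + 1)
      else if PySem.Str.startswith line " " then d.modify "context_lines" 0 (· + 1)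
      else d)
      (PySem.Dict.mk [("files_changed", a), ("hunks", b), ("lines_added", c),
                      ("lines_removed", d), ("context_lines", e)])).items
    = [("files_changed", a + (l.countP (fun s => PySem.Str.startswith s "+++") : Int)),
       ("hunks", b + (l.countP (fun s => PySem.Str.startswith s "@@") : Int)),
       ("lines_added", c + (l.countP (fun s => PySem.Str.startswith s "+" && !(PySem.Str.startswith s "+++")) : Int)),
       ("lines_removed", d + (l.countP (fun s => PySem.Str.startswith s "-" && !(PySem.Str.startswith s "---")) : Int)),
       ("context_lines", e + (l.countP (fun s => PySem.Str.startswith s " ") : Int))] := by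
  induction l generalizing a b c d e with
  | nil => simp
  | cons hd tl ih =>
    have t1 : ("+++" : String).toList = ['+','+','+'] := by decide
    have t2 : ("@@" : String).toList = ['@','@'] := by decide
    have t3 : ("+" : String).toList = ['+'] := by decide
    have t4 : ("-" : String).toList = ['-'] := by decide
    have t5 : (" " : String).toList = [' '] := by decide
    have t6 : ("---" : String).toList = ['-','-','-'] := by decide
    rcases hL : hd.toList with _ | ⟨c0, rest⟩
    · -- empty line: every predicate is false
      have f1 : PySem.Str.startswith hd "+++" = false := by
        simp only [PySem.Str.startswith_eq, hL, t1, t2, t3, t4, t5, t6]; exact pv_sw_nil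
      have f2 : PySem.Str.startswith hd "@@" = false := by
        simp only [PySem.Str.startswith_eq, hL, t1, t2, t3, t4, t5, t6]; exact pv_sw_nil
      have f3 : PySem.Str.startswith hd "+" = false := by
        simp only [PySem.Str.startswith_eq, hL, t1, t2, t3, t4, t5, t6]; exact pv_sw_nil
      have f4 : PySem.Str.startswith hd "-" = false := by
        simp only [PySem.Str.startswith_eq, hL, t1, t2, t3, t4, t5, t6]; exact pv_sw_nil
      have f5 : PySem.Str.startswith hd " " = false := by
        simp only [PySem.Str.startswith_eq, hL, t1, t2, t3, t4, t5, t6]; exact pv_sw_nil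
      simp only [List.foldl_cons, List.countP_cons, f1, f2, f3, f4, f5, Bool.false_and,
        if_false, Bool.false_eq_true]
      rw [ih]
      simp
    · -- nonempty line: classify by its first character
      by_cases hc : c0 = '+'
      · subst hc
        have f2 : PySem.Str.startswith hd "@@" = false := by
          simp only [PySem.Str.startswith_eq, hL, t1, t2, t3, t4, t5, t6]; exact pv_sw_cons (by decide)
        have f4 : PySem.Str.startswith hd "-" = false := by
          simp only [PySem.Str.startswith_eq, hL, t1, t2, t3, t4, t5, t6]; exact pv_sw_cons (by decide)
        have f5 : PySem.Str.startswith hd " " = false := by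
          simp only [PySem.Str.startswith_eq, hL, t1, t2, t3, t4, t5, t6]; exact pv_sw_cons (by decide)
        have f3 : PySem.Str.startswith hd "+" = true := by
          simp only [PySem.Str.startswith_eq, hL, t1, t2, t3, t4, t5, t6]; exact pv_sw_single
        by_cases h1 : PySem.Str.startswith hd "+++" = true
        · have hstep : (PySem.Dict.mk [("files_changed", a), ("hunks", b), ("lines_added", c),
              ("lines_removed", d), ("context_lines", e)]).modify "files_changed" 0 (· + 1)
            = PySem.Dict.mk [("files_changed", a + 1), ("hunks", b), ("lines_added", c),
              ("lines_removed", d), ("context_lines", e)] := rfl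
          simp only [List.foldl_cons, List.countP_cons, h1, f2, f3, f4, f5, Bool.not_true,
            Bool.and_false, if_true, if_false, Bool.false_eq_true, hstep]
          rw [ih]
          simp only [List.cons.injEq, Prod.mk.injEq, and_true, true_and, and_self]
          refine ⟨by push_cast; ring, by simp, by simp [h1], by simp [f4], by simp [f5]⟩
        · have h1' : PySem.Str.startswith hd "+++" = false := by
            simpa using h1
          have hstep : (PySem.Dict.mk [("files_changed", a), ("hunks", b), ("lines_added", c),
              ("lines_removed", d), ("context_lines", e)]).modify "lines_added" 0 (· + 1)
            = PySem.Dict.mk [("files_changed", a), ("hunks", b), ("lines_added", c + 1),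
              ("lines_removed", d), ("context_lines", e)] := rfl
          simp only [List.foldl_cons, List.countP_cons, h1', f2, f3, f4, f5, Bool.not_false,
            Bool.and_true, Bool.true_and, if_true, if_false, Bool.false_eq_true, hstep]
          rw [ih]
          simp only [List.cons.injEq, Prod.mk.injEq, and_true, true_and, and_self]
          refine ⟨by simp [h1'], by simp, by push_cast; ring, by simp [f4], by simp [f5]⟩
      · by_cases hc2 : c0 = '@'
        · subst hc2
          have f1 : PySem.Str.startswith hd "+++" = false := by
            simp only [PySem.Str.startswith_eq, hL, t1, t2, t3, t4, t5, t6]; exact pv_sw_cons (by decide)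
          have f3 : PySem.Str.startswith hd "+" = false := by
            simp only [PySem.Str.startswith_eq, hL, t1, t2, t3, t4, t5, t6]; exact pv_sw_cons (by decide)
          have f4 : PySem.Str.startswith hd "-" = false := by
            simp only [PySem.Str.startswith_eq, hL, t1, t2, t3, t4, t5, t6]; exact pv_sw_cons (by decide)
          have f5 : PySem.Str.startswith hd " " = false := by
            simp only [PySem.Str.startswith_eq, hL, t1, t2, t3, t4, t5, t6]; exact pv_sw_cons (by decide)
          by_cases h2 : PySem.Str.startswith hd "@@" = true
          · have hstep : (PySem.Dict.mk [("files_changed", a), ("hunks", b), ("lines_added", c),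
                ("lines_removed", d), ("context_lines", e)]).modify "hunks" 0 (· + 1)
              = PySem.Dict.mk [("files_changed", a), ("hunks", b + 1), ("lines_added", c),
                ("lines_removed", d), ("context_lines", e)] := rfl
            simp only [List.foldl_cons, List.countP_cons, f1, h2, f3, f4, f5, Bool.false_and,
              if_true, if_false, Bool.false_eq_true, hstep]
            rw [ih]
            simp only [List.cons.injEq, Prod.mk.injEq, and_true, true_and, and_self]
            refine ⟨by simp [f1], by push_cast; ring, by simp [f3], by simp [f4], by simp [f5]⟩
          · have h2' : PySem.Str.startswith hd "@@" = false := by simpa using h2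
            simp only [List.foldl_cons, List.countP_cons, f1, h2', f3, f4, f5, Bool.false_and,
              if_false, Bool.false_eq_true]
            rw [ih]
            simp [f1, h2', f3, f4, f5]
        · by_cases hc3 : c0 = '-'
          · subst hc3
            have f1 : PySem.Str.startswith hd "+++" = false := by
              simp only [PySem.Str.startswith_eq, hL, t1, t2, t3, t4, t5, t6]; exact pv_sw_cons (by decide)
            have f2 : PySem.Str.startswith hd "@@" = false := by
              simp only [PySem.Str.startswith_eq, hL, t1, t2, t3, t4, t5, t6]; exact pv_sw_cons (by decide)
            have f3 : PySem.Str.startswith hd "+" = false := by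
              simp only [PySem.Str.startswith_eq, hL, t1, t2, t3, t4, t5, t6]; exact pv_sw_cons (by decide)
            have f5 : PySem.Str.startswith hd " " = false := by
              simp only [PySem.Str.startswith_eq, hL, t1, t2, t3, t4, t5, t6]; exact pv_sw_cons (by decide)
            have f4 : PySem.Str.startswith hd "-" = true := by
              simp only [PySem.Str.startswith_eq, hL, t1, t2, t3, t4, t5, t6]; exact pv_sw_single
            by_cases h4 : PySem.Str.startswith hd "---" = true
            · simp only [List.foldl_cons, List.countP_cons, f1, f2, f3, f4, f5, h4,
                Bool.not_true, Bool.and_false, Bool.false_and, if_false, Bool.false_eq_true]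
              rw [ih]
              simp [f1, f2, f3, f5, h4]
            · have h4' : PySem.Str.startswith hd "---" = false := by simpa using h4
              have hstep : (PySem.Dict.mk [("files_changed", a), ("hunks", b), ("lines_added", c),
                  ("lines_removed", d), ("context_lines", e)]).modify "lines_removed" 0 (· + 1)
                = PySem.Dict.mk [("files_changed", a), ("hunks", b), ("lines_added", c),
                  ("lines_removed", d + 1), ("context_lines", e)] := rfl
              simp only [List.foldl_cons, List.countP_cons, f1, f2, f3, f4, f5, h4',
                Bool.not_false, Bool.and_true, Bool.true_and, Bool.false_and, if_true, if_false,
                Bool.false_eq_true, hstep]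
              rw [ih]
              simp only [List.cons.injEq, Prod.mk.injEq, and_true, true_and, and_self]
              refine ⟨by simp [f1], by simp [f2], by simp [f3], by push_cast; ring, by simp [f5]⟩
          · by_cases hc4 : c0 = ' '
            · subst hc4
              have f1 : PySem.Str.startswith hd "+++" = false := by
                simp only [PySem.Str.startswith_eq, hL, t1, t2, t3, t4, t5, t6]; exact pv_sw_cons (by decide)
              have f2 : PySem.Str.startswith hd "@@" = false := by
                simp only [PySem.Str.startswith_eq, hL, t1, t2, t3, t4, t5, t6]; exact pv_sw_cons (by decide)
              have f3 : PySem.Str.startswith hd "+" = false := by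
                simp only [PySem.Str.startswith_eq, hL, t1, t2, t3, t4, t5, t6]; exact pv_sw_cons (by decide)
              have f4 : PySem.Str.startswith hd "-" = false := by
                simp only [PySem.Str.startswith_eq, hL, t1, t2, t3, t4, t5, t6]; exact pv_sw_cons (by decide)
              have f5 : PySem.Str.startswith hd " " = true := by
                simp only [PySem.Str.startswith_eq, hL, t1, t2, t3, t4, t5, t6]; exact pv_sw_single
              have hstep : (PySem.Dict.mk [("files_changed", a), ("hunks", b), ("lines_added", c),
                  ("lines_removed", d), ("context_lines", e)]).modify "context_lines" 0 (· + 1)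
                = PySem.Dict.mk [("files_changed", a), ("hunks", b), ("lines_added", c),
                  ("lines_removed", d), ("context_lines", e + 1)] := rfl
              simp only [List.foldl_cons, List.countP_cons, f1, f2, f3, f4, f5, Bool.false_and,
                if_true, if_false, Bool.false_eq_true, hstep]
              rw [ih]
              simp only [List.cons.injEq, Prod.mk.injEq, and_true, true_and, and_self]
              refine ⟨by simp [f1], by simp [f2], by simp [f3], by simp [f4], by push_cast; ring⟩
            · -- any other first character: no branch fires, no predicate counts
              have f1 : PySem.Str.startswith hd "+++" = false := by
                simp only [PySem.Str.startswith_eq, hL, t1, t2, t3, t4, t5, t6]; exact pv_sw_cons (fun h => hc h.symm)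
              have f2 : PySem.Str.startswith hd "@@" = false := by
                simp only [PySem.Str.startswith_eq, hL, t1, t2, t3, t4, t5, t6]; exact pv_sw_cons (fun h => hc2 h.symm)
              have f3 : PySem.Str.startswith hd "+" = false := by
                simp only [PySem.Str.startswith_eq, hL, t1, t2, t3, t4, t5, t6]; exact pv_sw_cons (fun h => hc h.symm)
              have f4 : PySem.Str.startswith hd "-" = false := by
                simp only [PySem.Str.startswith_eq, hL, t1, t2, t3, t4, t5, t6]; exact pv_sw_cons (fun h => hc3 h.symm)
              have f5 : PySem.Str.startswith hd " " = false := by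
                simp only [PySem.Str.startswith_eq, hL, t1, t2, t3, t4, t5, t6]; exact pv_sw_cons (fun h => hc4 h.symm)
              simp only [List.foldl_cons, List.countP_cons, f1, f2, f3, f4, f5, Bool.false_and,
                if_false, Bool.false_eq_true]
              rw [ih]
              simp [f1, f2, f3, f4, f5]

-- ===== VERDICT (by name: the statement is the Claim_ definition above) =====
theorem analyze_patch_complexity_spec : Claim_equal_analyze_patch_complexity := by
  intro s _
  unfold Spec_analyze_patch_complexity analyze_patch_complexity analyze_patch_complexity_alt
  by_cases h : s == ""
  · simp only [h, if_true]
  · simp only [h, if_false, Bool.false_eq_true]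
    rw [pv_foldl_stats]
    simp
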